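-- pv_equiv track=rewrite | github.com/junsgi/Algorithm | 프로그래머스/1/389478. 택배 상자 꺼내기/택배 상자 꺼내기.py | solution
-- ===== SOURCE A (Python) =====
-- def solution(n, w, num):
--     answer=  0
--     c = n // w
--     box = [[0] * w for _ in range(c + 1)]
--     cnt = 0
--     x, y, k = 0, 0, 1
--     i, j = -1, -1
--     for _ in range(c + 1):
--         if cnt + 1 > n:break
--         for __ in range(w):
--             if cnt + 1 > n:break
--             box[x][y] = (cnt := cnt + 1)
--             if box[x][y] == num:
--                 i, j = x, y
--             y += k
--         y += -k
--         k = -k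
--         x += 1
--     while i < c + 1 and box[i][j] != 0:
--         answer += 1
--         i += 1
--     return answer
-- ===== SOURCE B (Python) =====
-- def solution(n, w, num):
--     # O(1) closed form: locate num's row/column by snake parity, count filled cells in that column at or below it.
--     q, m = divmod(n, w)
--     if num < 1 or num > n:
--         return 0
--     r, p = divmod(num - 1, w)
--     col = p if r % 2 == 0 else w - 1 - p
--     top_filled = (col < m) if q % 2 == 0 else (col >= w - m)
--     return q - r + (1 if top_filled else 0)
-- ===== Notes on version B (the rewrite author's own statement) =====
-- stated objective: faster
-- what changed: B replaces A's O(n) simulation (building the whole snake-filled grid, scanning for num, then walking the column) by O(1) arithmetic: num's row/column from divmod with snake parity, and the count of filled cells in that column from n's divmod.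
-- intended difference: When num is not in the grid (num<1 or num>n) and n//w is odd with n%w!=0, A's sentinel i=j=-1 makes box[-1][-1] hit a filled cell and A returns n//w+2 via negative-index wraparound; B returns 0 (num absent), the intended value. — e.g. on solution(3, 2, 7): A returns 3, B returns 0
-- outside the precondition, e.g. on solution(7, -3, 2): A returns 0, B returns -2
import Mathlib
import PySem

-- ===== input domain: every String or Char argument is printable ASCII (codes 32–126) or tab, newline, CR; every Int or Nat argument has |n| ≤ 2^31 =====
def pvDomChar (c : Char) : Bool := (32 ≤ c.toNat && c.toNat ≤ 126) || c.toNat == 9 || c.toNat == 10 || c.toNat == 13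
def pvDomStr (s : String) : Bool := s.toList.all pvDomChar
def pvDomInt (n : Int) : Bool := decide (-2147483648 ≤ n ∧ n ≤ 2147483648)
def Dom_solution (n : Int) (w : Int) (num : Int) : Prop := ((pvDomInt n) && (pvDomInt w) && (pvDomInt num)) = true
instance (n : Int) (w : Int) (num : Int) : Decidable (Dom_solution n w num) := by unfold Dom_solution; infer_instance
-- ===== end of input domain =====

-- B computes the answer by divmod arithmetic (snake parity) instead of simulating the grid
-- fill; on the corner where num is absent and A's i = j = -1 sentinel wraps around, B returns 0
-- (stated as D_ below).

-- ===== PORT A =====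
structure FillSt where
  box : Array (Array Int)
  cnt : Int
  x : Int
  y : Int
  k : Int
  i : Int
  j : Int
deriving Repr, DecidableEq

-- a[i] with Python index semantics over an Array (negative i from the end; none = IndexError);
-- the index rule is PySem's own (PySem.List.pyIdx?)
def pyGetA? {α : Type} (a : Array α) (i : Int) : Option α :=
  (PySem.List.pyIdx? a.size i).bind fun k => a[k]?

-- box[x][y] = v with Python index semantics (negative index wraps); an out-of-range write
-- leaves box unchanged (Python raises there; such a write is unreachable inside Pre_)
def pvSetRow (row : Array Int) (y v : Int) : Array Int :=
  let yi := if y < 0 then (row.size : Int) + y else y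
  if h : 0 ≤ yi ∧ yi < (row.size : Int) then row.set yi.toNat v (by omega) else row

def pvSetCell (box : Array (Array Int)) (x y v : Int) : Array (Array Int) :=
  let xi := if x < 0 then (box.size : Int) + x else x
  if 0 ≤ xi ∧ xi < (box.size : Int) then box.modify xi.toNat (fun row => pvSetRow row y v)
  else box

-- box[x][y] read (Python negative indexing); 0 out of range (Python raises; unreachable inside Pre_)
def pvGetCell (box : Array (Array Int)) (x y : Int) : Int :=
  ((pyGetA? box x).bind (fun row => pyGetA? row y)).getD 0

-- the inner 'for __ in range(w)' with its break; 'box[x][y] = (cnt := cnt + 1)' then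
-- 'if box[x][y] == num: i, j = x, y' then 'y += k'
def fillInner (n num : Int) : Nat → FillSt → FillSt
  | 0, s => s
  | f+1, s =>
    if s.cnt + 1 > n then s
    else
      fillInner n num f
        { box := pvSetCell s.box s.x s.y (s.cnt + 1), cnt := s.cnt + 1, x := s.x,
          y := s.y + s.k, k := s.k,
          i := if pvGetCell (pvSetCell s.box s.x s.y (s.cnt + 1)) s.x s.y = num then s.x else s.i,
          j := if pvGetCell (pvSetCell s.box s.x s.y (s.cnt + 1)) s.x s.y = num then s.y else s.j }

-- the outer 'for _ in range(c + 1)' with its break; after the inner loop: y += -k; k = -k; x += 1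
def fillOuter (n num w : Int) : Nat → FillSt → FillSt
  | 0, s => s
  | f+1, s =>
    if s.cnt + 1 > n then s
    else
      fillOuter n num w f
        { fillInner n num w.toNat s with
            y := (fillInner n num w.toNat s).y + -(fillInner n num w.toNat s).k,
            k := -(fillInner n num w.toNat s).k,
            x := (fillInner n num w.toNat s).x + 1 }

-- 'while i < c + 1 and box[i][j] != 0' (fuel c+2 suffices inside Pre_: i increases to c+1)
def countUp (c j : Int) (box : Array (Array Int)) : Nat → Int → Int → Int
  | 0, _, answer => answer
  | f+1, i, answer =>
    if i < c + 1 ∧ ¬ pvGetCell box i j = 0 then countUp c j box f (i+1) (answer+1) else answer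

def solution (n : Int) (w : Int) (num : Int) : Int :=
  let c := PySem.Int.floordiv n w
  let box0 := Array.replicate (c+1).toNat (Array.replicate w.toNat 0)
  let s := fillOuter n num w (c+1).toNat ⟨box0, 0, 0, 0, 1, -1, -1⟩
  countUp c s.j s.box (c+2).toNat s.i 0

-- ===== PORT B =====
def solution_alt (n : Int) (w : Int) (num : Int) : Int :=
  let q := PySem.Int.floordiv n w
  let m := PySem.Int.mod n w
  if num < 1 ∨ n < num then 0
  else
    let r := PySem.Int.floordiv (num - 1) w
    let p := PySem.Int.mod (num - 1) w
    let col := if PySem.Int.mod r 2 = 0 then p else w - 1 - p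
    let topFilled := if PySem.Int.mod q 2 = 0 then col < m else w - m ≤ col
    q - r + (if topFilled then 1 else 0)

-- ===== PRECONDITION & SPEC =====
-- Pre_ excludes w ≤ 0 and the band -w ≤ n ≤ -1: there A raises (ZeroDivisionError for w = 0,
-- IndexError on the empty grid / empty rows) except on degenerate w ≤ -1 inputs with
-- n // w ≤ -2, where A's empty loops fall through to 0 on a meaningless negative width.
def Pre_solution (n : Int) (w : Int) (num : Int) : Prop :=
  1 ≤ w ∧ (0 ≤ n ∨ PySem.Int.floordiv n w ≤ -2)
instance (n : Int) (w : Int) (num : Int) : Decidable (Pre_solution n w num) := by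
  unfold Pre_solution; infer_instance

def pvWitness_solution : Int × Int × Int := (10, 3, 7)

-- When num is not in the grid (num < 1 or num > n) and n//w is odd with n%w ≠ 0, A's sentinel
-- i = j = -1 makes box[-1][-1] hit a filled cell and A returns n//w + 2 via negative-index
-- wraparound; B returns 0 (num is absent), the intended value.
def D_solution (n : Int) (w : Int) (num : Int) : Prop :=
  0 ≤ n ∧ ¬ (1 ≤ num ∧ num ≤ n) ∧ PySem.Int.mod (PySem.Int.floordiv n w) 2 = 1 ∧ ¬ PySem.Int.mod n w = 0
instance (n : Int) (w : Int) (num : Int) : Decidable (D_solution n w num) := by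
  unfold D_solution; infer_instance

def Spec_solution (n : Int) (w : Int) (num : Int) (out : Int) : Prop :=
  ¬ D_solution n w num → out = solution_alt n w num
instance (n : Int) (w : Int) (num : Int) (out : Int) : Decidable (Spec_solution n w num out) := by
  unfold Spec_solution; infer_instance

def pvDiffWitness_solution : Int × Int × Int := (3, 2, 7)
def pvDiffWitnessOut_solution : Int × Int := (3, 0)

-- ===== CLAIM (what is proved, stated in full; the proofs are below) =====
def Claim_unchanged_solution : Prop := ∀ (n : Int) (w : Int) (num : Int), Dom_solution n w num → Pre_solution n w num → Spec_solution n w num (solution n w num)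
def Claim_changed_solution : Prop := Dom_solution (pvDiffWitness_solution.1) (pvDiffWitness_solution.2.1) (pvDiffWitness_solution.2.2) ∧ Pre_solution (pvDiffWitness_solution.1) (pvDiffWitness_solution.2.1) (pvDiffWitness_solution.2.2) ∧ D_solution (pvDiffWitness_solution.1) (pvDiffWitness_solution.2.1) (pvDiffWitness_solution.2.2) ∧ solution (pvDiffWitness_solution.1) (pvDiffWitness_solution.2.1) (pvDiffWitness_solution.2.2) = pvDiffWitnessOut_solution.1 ∧ solution_alt (pvDiffWitness_solution.1) (pvDiffWitness_solution.2.1) (pvDiffWitness_solution.2.2) = pvDiffWitnessOut_solution.2 ∧ pvDiffWitnessOut_solution.1 ≠ pvDiffWitnessOut_solution.2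
def Claim_exact_solution : Prop := ∀ (n : Int) (w : Int) (num : Int), Dom_solution n w num → Pre_solution n w num → D_solution n w num → solution n w num ≠ solution_alt n w num

-- ===== LEMMAS AND PROOFS =====

-- proof-side model: offI w t y = the 0-based offset, inside snake row t, of column y (an involution)
def offI (w t y : Int) : Int := if t % 2 = 0 then y else w - 1 - y

-- row t of the grid, its first p cells (in snake order) filled
def rowP (w t p : Int) : List Int :=
  (List.range w.toNat).map (fun (y : Nat) => if offI w t (y : Int) < p then t * w + offI w t (y : Int) + 1 else 0)

-- per-row fill cap while row t is being filled (p cells done): earlier rows capped by n, later rows empty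
def capP (n w t x p : Int) : Int := if x < t then n - x * w else if x = t then p else 0

def boxSt (n w t p : Int) (R : Nat) : List (List Int) :=
  (List.range R).map (fun (r : Nat) => rowP w (r : Int) (capP n w t (r : Int) p))

def kdir (t : Int) : Int := if t % 2 = 0 then 1 else -1

def iOf (w num cnt : Int) : Int := if 1 ≤ num ∧ num ≤ cnt then (num - 1) / w else -1

def jOf (w num cnt : Int) : Int :=
  if 1 ≤ num ∧ num ≤ cnt then offI w ((num - 1) / w) ((num - 1) % w) else -1

-- list-level mirrors of the port's Array primitives (the proofs run on lists)
def pvSetRowL (row : List Int) (y v : Int) : List Int :=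
  let yi := if y < 0 then (row.length : Int) + y else y
  if 0 ≤ yi ∧ yi < (row.length : Int) then row.set yi.toNat v else row

def pvSetCellL (box : List (List Int)) (x y v : Int) : List (List Int) :=
  let xi := if x < 0 then (box.length : Int) + x else x
  if 0 ≤ xi ∧ xi < (box.length : Int) then box.modify xi.toNat (fun row => pvSetRowL row y v)
  else box

def getCellL (box : List (List Int)) (x y : Int) : Int :=
  ((PySem.List.pyGet? box x).bind (fun row => PySem.List.pyGet? row y)).getD 0

def boxA (l : List (List Int)) : Array (Array Int) := (l.map List.toArray).toArray

def stAt (n w num t p : Int) (R : Nat) : FillSt :=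
  ⟨boxA (boxSt n w t p R), t * w + p, t, offI w t p, kdir t,
   iOf w num (t * w + p), jOf w num (t * w + p)⟩

theorem pyGetA?_toList {α : Type} (a : Array α) (i : Int) :
    pyGetA? a i = PySem.List.pyGet? a.toList i := by
  unfold pyGetA? PySem.List.pyGet?
  rw [Array.length_toList]
  cases PySem.List.pyIdx? a.size i with
  | none => rfl
  | some k => simp [Array.getElem?_toList]

theorem pyGet?_map {α β : Type} (f : α → β) (l : List α) (i : Int) :
    PySem.List.pyGet? (l.map f) i = (PySem.List.pyGet? l i).map f := by
  unfold PySem.List.pyGet?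
  rw [List.length_map]
  cases PySem.List.pyIdx? l.length i with
  | none => rfl
  | some k => simp [List.getElem?_map]

theorem pvGetCell_boxA (l : List (List Int)) (x y : Int) :
    pvGetCell (boxA l) x y = getCellL l x y := by
  unfold pvGetCell getCellL boxA
  rw [pyGetA?_toList, List.toList_toArray, pyGet?_map]
  cases hpg : PySem.List.pyGet? l x with
  | none => rfl
  | some r => simp [pyGetA?_toList]

theorem pvSetRow_toArray (r : List Int) (y v : Int) :
    pvSetRow r.toArray y v = (pvSetRowL r y v).toArray := by
  unfold pvSetRow pvSetRowL
  simp only [List.size_toArray]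
  by_cases h : 0 ≤ (if y < 0 then (r.length : Int) + y else y) ∧
      (if y < 0 then (r.length : Int) + y else y) < (r.length : Int)
  · rw [dif_pos h, if_pos h]
    apply Array.ext'
    rw [Array.toList_set, List.toList_toArray, List.toList_toArray]
  · rw [dif_neg h, if_neg h]

theorem pvSetCell_boxA (l : List (List Int)) (x y v : Int) :
    pvSetCell (boxA l) x y v = boxA (pvSetCellL l x y v) := by
  unfold pvSetCell pvSetCellL boxA
  simp only [List.size_toArray, List.length_map]
  by_cases h : 0 ≤ (if x < 0 then (l.length : Int) + x else x) ∧
      (if x < 0 then (l.length : Int) + x else x) < (l.length : Int)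
  · rw [if_pos h, if_pos h]
    apply Array.ext'
    rw [Array.toList_modify, List.toList_toArray, List.toList_toArray]
    apply List.ext_getElem
    · simp [List.length_modify]
    intro k hk1 hk2
    simp only [List.getElem_modify, List.getElem_map]
    by_cases hkx : (if x < 0 then (l.length : Int) + x else x).toNat = k
    · rw [if_pos hkx, if_pos hkx, pvSetRow_toArray]
    · rw [if_neg hkx, if_neg hkx]
  · rw [if_neg h, if_neg h]

theorem boxA_replicate (R W : Nat) :
    Array.replicate R (Array.replicate W (0 : Int)) =
      boxA (List.replicate R (List.replicate W 0)) := by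
  apply Array.ext'
  unfold boxA
  rw [Array.toList_replicate, List.toList_toArray, List.map_replicate,
      show (List.replicate W (0:Int)).toArray = Array.replicate W (0:Int) from
        Array.ext' (by rw [Array.toList_replicate, List.toList_toArray])]

theorem offI_offI (w t y : Int) : offI w t (offI w t y) = y := by
  unfold offI; split_ifs <;> omega

theorem offI_bounds (w t y : Int) (h0 : 0 ≤ y) (h1 : y < w) :
    0 ≤ offI w t y ∧ offI w t y < w := by
  unfold offI; split_ifs <;> omega

theorem offI_eq_iff (w t y p : Int) : offI w t y = p ↔ y = offI w t p := by
  unfold offI; split_ifs <;> omega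

theorem length_rowP (w t p : Int) : (rowP w t p).length = w.toNat := by simp [rowP]

theorem length_boxSt (n w t p : Int) (R : Nat) : (boxSt n w t p R).length = R := by simp [boxSt]

theorem pyRow_boxSt (n w t p : Int) (R : Nat) (x : Int) (hx0 : 0 ≤ x) (hxR : x < (R : Int)) :
    PySem.List.pyGet? (boxSt n w t p R) x = some (rowP w x (capP n w t x p)) := by
  rw [PySem.List.pyGet?_eq_some_getElem _ hx0 (by rw [length_boxSt]; omega)]
  congr 1
  simp only [boxSt, List.getElem_map, List.getElem_range]
  rw [Int.toNat_of_nonneg hx0]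

theorem pvGetCell_boxSt (n w t p : Int) (R : Nat) (x y : Int) (hx0 : 0 ≤ x)
    (hxR : x < (R : Int)) (hy0 : 0 ≤ y) (hyw : y < w) :
    pvGetCell (boxA (boxSt n w t p R)) x y =
      (if offI w x y < capP n w t x p then x * w + offI w x y + 1 else 0) := by
  rw [pvGetCell_boxA]
  unfold getCellL
  rw [pyRow_boxSt n w t p R x hx0 hxR, Option.bind_some]
  rw [PySem.List.pyGet?_eq_some_getElem _ hy0 (by rw [length_rowP]; omega)]
  simp only [Option.getD_some]
  simp only [rowP, List.getElem_map, List.getElem_range]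
  rw [Int.toNat_of_nonneg hy0]

theorem pvGetCell_boxSt_negcol (n w t p : Int) (R : Nat) (hw : 1 ≤ w) (x : Int)
    (hx0 : 0 ≤ x) (hxR : x < (R : Int)) :
    pvGetCell (boxA (boxSt n w t p R)) x (-1) = pvGetCell (boxA (boxSt n w t p R)) x (w - 1) := by
  rw [pvGetCell_boxA, pvGetCell_boxA]
  unfold getCellL
  rw [pyRow_boxSt n w t p R x hx0 hxR, Option.bind_some, Option.bind_some]
  have hlen : (rowP w x (capP n w t x p)).length = w.toNat := length_rowP ..
  rw [PySem.List.pyGet?_neg_one, List.getLast?_eq_getElem?,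
      PySem.List.pyGet?_of_nonneg _ (by omega : (0:Int) ≤ w - 1)]
  have : (w - 1).toNat = (rowP w x (capP n w t x p)).length - 1 := by omega
  rw [this]

theorem pvGetCell_boxSt_negrow (n w t p : Int) (R : Nat) (hR : 0 < R) (y : Int) :
    pvGetCell (boxA (boxSt n w t p R)) (-1) y = pvGetCell (boxA (boxSt n w t p R)) ((R : Int) - 1) y := by
  rw [pvGetCell_boxA, pvGetCell_boxA]
  unfold getCellL
  have hlen : (boxSt n w t p R).length = R := length_boxSt ..
  rw [PySem.List.pyGet?_neg_one, List.getLast?_eq_getElem?,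
      PySem.List.pyGet?_of_nonneg _ (by omega : (0:Int) ≤ (R : Int) - 1)]
  have : ((R : Int) - 1).toNat = (boxSt n w t p R).length - 1 := by omega
  rw [this]

theorem capP_self (n w t p : Int) : capP n w t t p = p := by
  unfold capP; rw [if_neg (by omega), if_pos rfl]

theorem pvSetCellL_boxSt (n w t p : Int) (R : Nat) (hw : 1 ≤ w) (ht0 : 0 ≤ t)
    (htR : t < (R : Int)) (hp0 : 0 ≤ p) (hpw : p < w) :
    pvSetCellL (boxSt n w t p R) t (offI w t p) (t * w + p + 1) = boxSt n w t (p + 1) R := by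
  have hyb := offI_bounds w t p hp0 hpw
  simp only [pvSetCellL, length_boxSt]
  rw [if_neg (show ¬ t < 0 by omega)]
  rw [if_pos (show (0:Int) ≤ t ∧ t < (R : Int) from ⟨ht0, htR⟩)]
  apply List.ext_getElem
  · simp [List.length_modify, length_boxSt]
  intro r hr1 hr2
  rw [length_boxSt] at hr2
  rw [List.getElem_modify]
  by_cases hrt : t.toNat = r
  · rw [if_pos hrt]
    simp only [boxSt, List.getElem_map, List.getElem_range]
    have hti : ((r : Nat) : Int) = t := by omega
    rw [hti, capP_self, capP_self]
    simp only [pvSetRowL, length_rowP]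
    rw [if_neg (show ¬ offI w t p < 0 by omega)]
    rw [if_pos (show (0:Int) ≤ offI w t p ∧ offI w t p < ((w.toNat : Nat) : Int) from
          ⟨hyb.1, by omega⟩)]
    apply List.ext_getElem
    · simp [List.length_set, length_rowP]
    intro z hz1 hz2
    rw [length_rowP] at hz2
    rw [List.getElem_set]
    simp only [rowP, List.getElem_map, List.getElem_range]
    by_cases hzy : (offI w t p).toNat = z
    · rw [if_pos hzy]
      have hzi : ((z : Nat) : Int) = offI w t p := by omega
      rw [hzi, offI_offI, if_pos (by omega)]
    · rw [if_neg hzy]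
      have hzi : ((z : Nat) : Int) ≠ offI w t p := by omega
      have hoff : offI w t ((z : Nat) : Int) ≠ p := by
        intro h; exact hzi ((offI_eq_iff w t z p).mp h)
      by_cases hlt : offI w t ((z : Nat) : Int) < p
      · rw [if_pos hlt, if_pos (by omega)]
      · rw [if_neg hlt, if_neg (by omega)]
  · rw [if_neg hrt]
    simp only [boxSt, List.getElem_map, List.getElem_range]
    have hti : ((r : Nat) : Int) ≠ t := by omega
    unfold capP
    by_cases h1 : ((r : Nat) : Int) < t
    · rw [if_pos h1, if_pos h1]
    · rw [if_neg h1, if_neg hti, if_neg h1, if_neg hti]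

theorem pvSetCell_boxSt (n w t p : Int) (R : Nat) (hw : 1 ≤ w) (ht0 : 0 ≤ t)
    (htR : t < (R : Int)) (hp0 : 0 ≤ p) (hpw : p < w) :
    pvSetCell (boxA (boxSt n w t p R)) t (offI w t p) (t * w + p + 1) =
      boxA (boxSt n w t (p + 1) R) := by
  rw [pvSetCell_boxA, pvSetCellL_boxSt n w t p R hw ht0 htR hp0 hpw]

theorem iOf_succ (w num t p : Int) (hw : 1 ≤ w) (ht0 : 0 ≤ t) (hp0 : 0 ≤ p) (hpw : p < w) :
    (if t * w + p + 1 = num then t else iOf w num (t * w + p)) = iOf w num (t * w + p + 1) := by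
  have hdiv : (t * w + p) / w = t := by
    rw [add_comm, Int.add_mul_ediv_right p t (by omega), Int.ediv_eq_zero_of_lt hp0 hpw]
    omega
  have hcnt : 0 ≤ t * w + p := by positivity
  unfold iOf
  by_cases h : t * w + p + 1 = num
  · rw [if_pos h, if_pos (by omega), ← h]
    rw [show t * w + p + 1 - 1 = t * w + p by ring, hdiv]
  · rw [if_neg h]
    by_cases hf : 1 ≤ num ∧ num ≤ t * w + p
    · rw [if_pos hf, if_pos (by omega)]
    · rw [if_neg hf, if_neg (by omega)]

theorem jOf_succ (w num t p : Int) (hw : 1 ≤ w) (ht0 : 0 ≤ t) (hp0 : 0 ≤ p) (hpw : p < w) :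
    (if t * w + p + 1 = num then offI w t p else jOf w num (t * w + p)) =
      jOf w num (t * w + p + 1) := by
  have hdiv : (t * w + p) / w = t := by
    rw [add_comm, Int.add_mul_ediv_right p t (by omega), Int.ediv_eq_zero_of_lt hp0 hpw]
    omega
  have hmod : (t * w + p) % w = p := by
    rw [add_comm, Int.add_mul_emod_self_right]
    exact Int.emod_eq_of_lt hp0 hpw
  have hcnt : 0 ≤ t * w + p := by positivity
  unfold jOf
  by_cases h : t * w + p + 1 = num
  · rw [if_pos h, if_pos (by omega), ← h]
    rw [show t * w + p + 1 - 1 = t * w + p by ring, hdiv, hmod]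
  · rw [if_neg h]
    by_cases hf : 1 ≤ num ∧ num ≤ t * w + p
    · rw [if_pos hf, if_pos (by omega)]
    · rw [if_neg hf, if_neg (by omega)]

theorem offI_step (w t p : Int) : offI w t p + kdir t = offI w t (p + 1) := by
  unfold offI kdir; split_ifs <;> omega

theorem fillInner_run (n w num t : Int) (R : Nat) (hw : 1 ≤ w)
    (ht0 : 0 ≤ t) (htR : t < (R : Int)) (htn : t * w ≤ n) :
    ∀ (f : Nat) (p : Int), 0 ≤ p → p + (f : Int) = w → p ≤ min w (n - t * w) →
      fillInner n num f (stAt n w num t p R) = stAt n w num t (min w (n - t * w)) R := by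
  intro f
  induction f with
  | zero =>
    intro p hp0 hpf hple
    have hpe : p = min w (n - t * w) := by omega
    rw [hpe, fillInner]
  | succ f ih =>
    intro p hp0 hpf hple
    have hcnt : (stAt n w num t p R).cnt = t * w + p := rfl
    rw [fillInner]
    by_cases hbr : (stAt n w num t p R).cnt + 1 > n
    · rw [hcnt] at hbr
      have hpe : p = min w (n - t * w) := by omega
      rw [if_pos (by rw [hcnt]; omega), hpe]
    · rw [hcnt] at hbr
      have hpw : p < w := by omega
      rw [if_neg (by rw [hcnt]; omega)]
      have hyb := offI_bounds w t p hp0 hpw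
      have hbox : pvSetCell (stAt n w num t p R).box (stAt n w num t p R).x
          (stAt n w num t p R).y ((stAt n w num t p R).cnt + 1) = boxA (boxSt n w t (p + 1) R) := by
        show pvSetCell (boxA (boxSt n w t p R)) t (offI w t p) (t * w + p + 1) = _
        exact pvSetCell_boxSt n w t p R hw ht0 htR hp0 hpw
      have hread : pvGetCell (boxA (boxSt n w t (p + 1) R)) t (offI w t p) = t * w + p + 1 := by
        rw [pvGetCell_boxSt n w t (p + 1) R t (offI w t p) ht0 htR hyb.1 hyb.2,
            capP_self, offI_offI, if_pos (by omega)]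
      have hst :
          ({ box := pvSetCell (stAt n w num t p R).box (stAt n w num t p R).x
              (stAt n w num t p R).y ((stAt n w num t p R).cnt + 1),
             cnt := (stAt n w num t p R).cnt + 1,
             x := (stAt n w num t p R).x,
             y := (stAt n w num t p R).y + (stAt n w num t p R).k,
             k := (stAt n w num t p R).k,
             i := if pvGetCell (pvSetCell (stAt n w num t p R).box (stAt n w num t p R).x
                    (stAt n w num t p R).y ((stAt n w num t p R).cnt + 1))
                    (stAt n w num t p R).x (stAt n w num t p R).y = num
                  then (stAt n w num t p R).x else (stAt n w num t p R).i,
             j := if pvGetCell (pvSetCell (stAt n w num t p R).box (stAt n w num t p R).x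
                    (stAt n w num t p R).y ((stAt n w num t p R).cnt + 1))
                    (stAt n w num t p R).x (stAt n w num t p R).y = num
                  then (stAt n w num t p R).y else (stAt n w num t p R).j } : FillSt) =
          stAt n w num t (p + 1) R := by
        rw [hbox]
        show FillSt.mk _ _ _ _ _ _ _ = FillSt.mk _ _ _ _ _ _ _
        rw [FillSt.mk.injEq]
        refine ⟨rfl, by show t * w + p + 1 = t * w + (p + 1); ring, rfl, ?_, rfl, ?_, ?_⟩
        · show offI w t p + kdir t = offI w t (p + 1)
          exact offI_step w t p
        · show (if pvGetCell (boxA (boxSt n w t (p + 1) R)) t (offI w t p) = num then t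
                else iOf w num (t * w + p)) = iOf w num (t * w + (p + 1))
          rw [hread, show t * w + (p + 1) = t * w + p + 1 by ring]
          exact iOf_succ w num t p hw ht0 hp0 hpw
        · show (if pvGetCell (boxA (boxSt n w t (p + 1) R)) t (offI w t p) = num then offI w t p
                else jOf w num (t * w + p)) = jOf w num (t * w + (p + 1))
          rw [hread, show t * w + (p + 1) = t * w + p + 1 by ring]
          exact jOf_succ w num t p hw ht0 hp0 hpw
      rw [hst]
      exact ih (p + 1) (by omega) (by push_cast at hpf ⊢; omega) (by omega)

theorem fillOuter_stop (n num w : Int) (f : Nat) (s : FillSt) (h : n < s.cnt + 1) :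
    fillOuter n num w f s = s := by
  cases f with
  | zero => rw [fillOuter]
  | succ f => rw [fillOuter, if_pos (by omega)]

theorem boxSt_shift (n w t : Int) (R : Nat) (hw : 1 ≤ w) (ht0 : 0 ≤ t)
    (hfull : t * w + w ≤ n) :
    boxSt n w t w R = boxSt n w (t + 1) 0 R := by
  apply List.ext_getElem
  · rw [length_boxSt, length_boxSt]
  intro r hr1 hr2
  rw [length_boxSt] at hr2
  simp only [boxSt, List.getElem_map, List.getElem_range]
  unfold capP
  by_cases h1 : ((r : Nat) : Int) < t
  · rw [if_pos h1, if_pos (by omega)]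
  · by_cases h2 : ((r : Nat) : Int) = t
    · rw [h2, if_neg (by omega), if_pos rfl, if_pos (by omega)]
      apply List.ext_getElem
      · rw [length_rowP, length_rowP]
      intro z hz1 hz2
      rw [length_rowP] at hz2
      simp only [rowP, List.getElem_map, List.getElem_range]
      have hzb : 0 ≤ ((z : Nat) : Int) ∧ ((z : Nat) : Int) < w := by constructor <;> omega
      have hob := offI_bounds w t z hzb.1 hzb.2
      rw [if_pos (by omega), if_pos (by omega)]
    · rw [if_neg h1, if_neg h2, if_neg (by omega : ¬ ((r : Nat) : Int) < t + 1), ite_self]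

theorem kdir_step (t : Int) : -kdir t = kdir (t + 1) := by
  unfold kdir; split_ifs <;> omega

theorem fillOuter_run (n w num : Int) (hw : 1 ≤ w) (hn : 0 ≤ n) :
    ∀ (f : Nat) (t : Int), 0 ≤ t → t + (f : Int) = n / w + 1 → t * w ≤ n →
      ∃ s', fillOuter n num w f (stAt n w num t 0 ((n / w + 1).toNat)) = s' ∧
        s'.box = boxA (boxSt n w (n / w) (n % w) ((n / w + 1).toNat)) ∧
        s'.i = iOf w num n ∧ s'.j = jOf w num n := by
  intro f
  induction f with
  | zero =>
    intro t ht0 htf htn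
    exfalso
    have : t ≤ n / w := (Int.le_ediv_iff_mul_le (by omega)).mpr htn
    push_cast at htf
    omega
  | succ f ih =>
    intro t ht0 htf htn
    have hq0 : 0 ≤ n / w := Int.ediv_nonneg hn (by omega)
    have htq : t ≤ n / w := (Int.le_ediv_iff_mul_le (by omega)).mpr htn
    have htR : t < (((n / w + 1).toNat : Nat) : Int) := by omega
    have hcnt : (stAt n w num t 0 ((n / w + 1).toNat)).cnt = t * w + 0 := rfl
    rw [fillOuter]
    by_cases hbr : (stAt n w num t 0 ((n / w + 1).toNat)).cnt + 1 > n
    · rw [hcnt] at hbr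
      have heq : t * w = n := by omega
      have hqt : n / w = t := by rw [← heq, Int.mul_ediv_cancel t (by omega)]
      have hmt : n % w = 0 := by rw [← heq, Int.mul_emod_left]
      refine ⟨stAt n w num t 0 ((n / w + 1).toNat), by rw [if_pos (by rw [hcnt]; omega)],
        ?_, ?_, ?_⟩
      · show boxA (boxSt n w t 0 _) = boxA (boxSt n w (n / w) (n % w) _)
        rw [hqt, hmt]
      · show iOf w num (t * w + 0) = iOf w num n
        rw [show t * w + 0 = n by omega]
      · show jOf w num (t * w + 0) = jOf w num n
        rw [show t * w + 0 = n by omega]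
    · rw [hcnt] at hbr
      rw [if_neg (by rw [hcnt]; omega)]
      have hinner := fillInner_run n w num t ((n / w + 1).toNat) hw ht0 htR htn w.toNat 0
        le_rfl (by omega) (by omega)
      rw [hinner]
      by_cases hfull : t * w + w ≤ n
      · have hpew : min w (n - t * w) = w := by omega
        have hnext : (t + 1) * w ≤ n := by nlinarith
        have hst :
            ({ stAt n w num t (min w (n - t * w)) ((n / w + 1).toNat) with
                y := (stAt n w num t (min w (n - t * w)) ((n / w + 1).toNat)).y +
                  -(stAt n w num t (min w (n - t * w)) ((n / w + 1).toNat)).k,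
                k := -(stAt n w num t (min w (n - t * w)) ((n / w + 1).toNat)).k,
                x := (stAt n w num t (min w (n - t * w)) ((n / w + 1).toNat)).x + 1 } : FillSt) =
              stAt n w num (t + 1) 0 ((n / w + 1).toNat) := by
          show FillSt.mk _ _ _ _ _ _ _ = FillSt.mk _ _ _ _ _ _ _
          rw [FillSt.mk.injEq]
          refine ⟨?_, ?_, rfl, ?_, ?_, ?_, ?_⟩
          · show boxA (boxSt n w t (min w (n - t * w)) _) = boxA (boxSt n w (t + 1) 0 _)
            rw [hpew]; exact congrArg boxA (boxSt_shift n w t _ hw ht0 hfull)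
          · show t * w + min w (n - t * w) = (t + 1) * w + 0
            rw [hpew]; ring
          · show offI w t (min w (n - t * w)) + -kdir t = offI w (t + 1) 0
            rw [hpew]; unfold offI kdir; split_ifs <;> omega
          · show -kdir t = kdir (t + 1)
            exact kdir_step t
          · show iOf w num (t * w + min w (n - t * w)) = iOf w num ((t + 1) * w + 0)
            rw [hpew, show t * w + w = (t + 1) * w + 0 by ring]
          · show jOf w num (t * w + min w (n - t * w)) = jOf w num ((t + 1) * w + 0)
            rw [hpew, show t * w + w = (t + 1) * w + 0 by ring]
        rw [hst]
        exact ih (t + 1) (by omega) (by push_cast at htf ⊢; omega) hnext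
      · have hqt : n / w = t := by
          have h1 : n / w < t + 1 := by
            rw [Int.ediv_lt_iff_lt_mul (by omega)]
            have : (t + 1) * w = t * w + w := by ring
            omega
          omega
        have hpem : min w (n - t * w) = n - t * w := by omega
        refine ⟨_, rfl, ?_, ?_, ?_⟩
        all_goals rw [fillOuter_stop n num w f _
          (by show n < t * w + min w (n - t * w) + 1; omega)]
        · show boxA (boxSt n w t (min w (n - t * w)) _) = boxA (boxSt n w (n / w) (n % w) _)
          rw [hpem, hqt, show n % w = n - t * w by rw [Int.emod_def, hqt]; ring]
        · show iOf w num (t * w + min w (n - t * w)) = iOf w num n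
          rw [show t * w + min w (n - t * w) = n by omega]
        · show jOf w num (t * w + min w (n - t * w)) = jOf w num n
          rw [show t * w + min w (n - t * w) = n by omega]

theorem countUp_stop (c j : Int) (box : Array (Array Int)) (f : Nat) (i a : Int)
    (h : ¬ i < c + 1) : countUp c j box f i a = a := by
  cases f with
  | zero => rw [countUp]
  | succ f => rw [countUp, if_neg (by tauto)]

theorem countUp_run (q j : Int) (box : Array (Array Int)) (hq : 0 ≤ q) :
    ∀ (d f : Nat) (i a : Int), i = q - (d : Int) → d + 1 ≤ f →
      (∀ x : Int, i ≤ x → x < q → ¬ pvGetCell box x j = 0) →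
      countUp q j box f i a = a + d + (if pvGetCell box q j = 0 then 0 else 1) := by
  intro d
  induction d with
  | zero =>
    intro f i a hi hf hcells
    obtain ⟨f', rfl⟩ : ∃ f', f = f' + 1 := ⟨f - 1, by omega⟩
    have hiq : i = q := by push_cast at hi; omega
    rw [countUp]
    by_cases hz : pvGetCell box q j = 0
    · rw [if_neg (by rw [hiq, hz]; simp), if_pos hz]
      omega
    · rw [if_pos (by rw [hiq]; exact ⟨by omega, hz⟩),
          countUp_stop q j box f' (i + 1) (a + 1) (by omega), if_neg hz]
      omega
  | succ d ih =>
    intro f i a hi hf hcells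
    obtain ⟨f', rfl⟩ : ∃ f', f = f' + 1 := ⟨f - 1, by omega⟩
    have hiq : i < q := by push_cast at hi; omega
    rw [countUp, if_pos ⟨by omega, hcells i le_rfl hiq⟩,
        ih f' (i + 1) (a + 1) (by push_cast at hi ⊢; omega) (by omega)
          (fun x hx1 hx2 => hcells x (by omega) hx2)]
    push_cast
    ring

theorem boxSt_zero (n w : Int) (R : Nat) :
    List.replicate R (List.replicate w.toNat 0) = boxSt n w 0 0 R := by
  apply List.ext_getElem
  · rw [length_boxSt, List.length_replicate]
  intro r hr1 hr2
  rw [length_boxSt] at hr2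
  rw [List.getElem_replicate]
  simp only [boxSt, List.getElem_map, List.getElem_range]
  apply List.ext_getElem
  · rw [length_rowP, List.length_replicate]
  intro z hz1 hz2
  rw [length_rowP] at hz2
  rw [List.getElem_replicate]
  simp only [rowP, List.getElem_map, List.getElem_range]
  have hzb : 0 ≤ ((z : Nat) : Int) ∧ ((z : Nat) : Int) < w := by constructor <;> omega
  have hob := offI_bounds w ((r : Nat) : Int) z hzb.1 hzb.2
  have hcap : capP n w 0 ((r : Nat) : Int) 0 ≤ 0 := by
    unfold capP; split_ifs <;> omega
  rw [if_neg (by omega)]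

theorem solution_closed (n w num : Int) (hw : 1 ≤ w) (hn : 0 ≤ n) :
    solution n w num =
      (if D_solution n w num then PySem.Int.floordiv n w + 2 else solution_alt n w num) := by
  have hw0 : 0 < w := by omega
  have hfd : PySem.Int.floordiv n w = n / w := PySem.Int.floordiv_eq_ediv_of_pos hw0
  have hmd : PySem.Int.mod n w = n % w := PySem.Int.mod_eq_emod_of_pos hw0
  have hq0 : 0 ≤ n / w := Int.ediv_nonneg hn (by omega)
  have hm0 : 0 ≤ n % w := Int.emod_nonneg n (by omega)
  have hmw : n % w < w := Int.emod_lt_of_pos n hw0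
  have hnqm : w * (n / w) + n % w = n := Int.ediv_add_emod n w
  have hinit : (⟨Array.replicate (n / w + 1).toNat (Array.replicate w.toNat 0),
      0, 0, 0, 1, -1, -1⟩ : FillSt) = stAt n w num 0 0 ((n / w + 1).toNat) := by
    show FillSt.mk _ _ _ _ _ _ _ = FillSt.mk _ _ _ _ _ _ _
    rw [FillSt.mk.injEq]
    refine ⟨by rw [boxA_replicate, boxSt_zero], by ring, rfl, ?_, ?_, ?_, ?_⟩
    · show (0 : Int) = offI w 0 0
      unfold offI; rw [if_pos (by omega)]
    · show (1 : Int) = kdir 0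
      unfold kdir; rw [if_pos (by omega)]
    · show (-1 : Int) = iOf w num (0 * w + 0)
      unfold iOf; rw [if_neg (by omega)]
    · show (-1 : Int) = jOf w num (0 * w + 0)
      unfold jOf; rw [if_neg (by omega)]
  obtain ⟨s', hrun, hbox, hi, hj⟩ := fillOuter_run n w num hw hn ((n / w + 1).toNat) 0
    le_rfl (by omega) (by omega)
  have hsol : solution n w num = countUp (n / w) (jOf w num n)
      (boxA (boxSt n w (n / w) (n % w) ((n / w + 1).toNat))) ((n / w + 2).toNat) (iOf w num n) 0 := by
    simp only [solution]
    rw [hfd, hinit, hrun, hbox, hi, hj]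
  rw [hsol]
  by_cases hfound : 1 ≤ num ∧ num ≤ n
  · -- num is in the grid: both sides count the column from num's cell downwards
    have hD : ¬ D_solution n w num := by unfold D_solution; tauto
    rw [if_neg hD]
    have hr0 : 0 ≤ (num - 1) / w := Int.ediv_nonneg (by omega) (by omega)
    have hpp0 : 0 ≤ (num - 1) % w := Int.emod_nonneg _ (by omega)
    have hppw : (num - 1) % w < w := Int.emod_lt_of_pos _ hw0
    have hrw : w * ((num - 1) / w) + (num - 1) % w = num - 1 := Int.ediv_add_emod (num - 1) w
    have hrq : (num - 1) / w ≤ n / w := by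
      apply (Int.le_ediv_iff_mul_le hw0).mpr
      nlinarith
    have hiv : iOf w num n = (num - 1) / w := by unfold iOf; rw [if_pos hfound]
    have hjv : jOf w num n = offI w ((num - 1) / w) ((num - 1) % w) := by
      unfold jOf; rw [if_pos hfound]
    have hcolb := offI_bounds w ((num - 1) / w) ((num - 1) % w) hpp0 hppw
    have hcells : ∀ x : Int, (num - 1) / w ≤ x → x < n / w →
        ¬ pvGetCell (boxA (boxSt n w (n / w) (n % w) ((n / w + 1).toNat))) x
            (offI w ((num - 1) / w) ((num - 1) % w)) = 0 := by
      intro x hx1 hx2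
      have hxb := offI_bounds w x _ hcolb.1 hcolb.2
      rw [pvGetCell_boxSt n w (n / w) (n % w) _ x _ (by omega) (by omega) hcolb.1 hcolb.2]
      have hcap : capP n w (n / w) x (n % w) = n - x * w := by
        unfold capP; rw [if_pos hx2]
      have hxw : x * w + w ≤ n := by nlinarith
      rw [hcap, if_pos (by omega)]
      have hx0 : 0 ≤ x := le_trans hr0 hx1
      have : 0 ≤ x * w := mul_nonneg hx0 (by omega)
      omega
    have htop : pvGetCell (boxA (boxSt n w (n / w) (n % w) ((n / w + 1).toNat))) (n / w)
        (offI w ((num - 1) / w) ((num - 1) % w)) =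
        (if offI w (n / w) (offI w ((num - 1) / w) ((num - 1) % w)) < n % w
         then (n / w) * w + offI w (n / w) (offI w ((num - 1) / w) ((num - 1) % w)) + 1
         else 0) := by
      rw [pvGetCell_boxSt n w (n / w) (n % w) _ (n / w) _ hq0 (by omega) hcolb.1 hcolb.2,
          capP_self]
    have hd1 : (num - 1) / w = n / w - (((n / w - (num - 1) / w).toNat : Nat) : Int) := by omega
    have hd2 : (n / w - (num - 1) / w).toNat + 1 ≤ (n / w + 2).toNat := by omega
    rw [hiv, hjv,
        countUp_run (n / w) _ _ hq0 (n / w - (num - 1) / w).toNat ((n / w + 2).toNat)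
          ((num - 1) / w) 0 hd1 hd2 hcells, htop]
    have hqcol := offI_bounds w (n / w) _ hcolb.1 hcolb.2
    simp only [solution_alt]
    rw [if_neg (show ¬ (num < 1 ∨ n < num) by omega), hfd, hmd,
        PySem.Int.floordiv_eq_ediv_of_pos hw0, PySem.Int.mod_eq_emod_of_pos hw0,
        PySem.Int.mod_eq_emod_of_pos (by omega : (0:Int) < 2),
        PySem.Int.mod_eq_emod_of_pos (by omega : (0:Int) < 2)]
    have hcolalt : (if (num - 1) / w % 2 = 0 then (num - 1) % w else w - 1 - (num - 1) % w) =
        offI w ((num - 1) / w) ((num - 1) % w) := rfl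
    rw [hcolalt]
    have hqw : 0 ≤ (n / w) * w := mul_nonneg hq0 (by omega)
    have hqw2 : (n / w) * w = w * (n / w) := by ring
    unfold offI
    split_ifs <;> omega
  · -- num is absent: A starts its column walk at box[-1][-1]
    have hiv : iOf w num n = -1 := by unfold iOf; rw [if_neg hfound]
    have hjv : jOf w num n = -1 := by unfold jOf; rw [if_neg hfound]
    rw [hiv, hjv]
    have hR1 : (((n / w + 1).toNat : Nat) : Int) - 1 = n / w := by omega
    have hcorner : pvGetCell (boxA (boxSt n w (n / w) (n % w) ((n / w + 1).toNat))) (-1) (-1) =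
        (if offI w (n / w) (w - 1) < n % w
         then (n / w) * w + offI w (n / w) (w - 1) + 1 else 0) := by
      rw [pvGetCell_boxSt_negrow n w (n / w) (n % w) _ (by omega) (-1),
          pvGetCell_boxSt_negcol n w (n / w) (n % w) _ hw _ (by omega) (by omega), hR1,
          pvGetCell_boxSt n w (n / w) (n % w) _ (n / w) (w - 1) hq0 (by omega)
            (by omega) (by omega), capP_self]
    have haltz : solution_alt n w num = 0 := by
      simp only [solution_alt]; rw [if_pos (show num < 1 ∨ n < num by omega)]
    obtain ⟨F, hF⟩ : ∃ F, (n / w + 2).toNat = F + 1 := ⟨(n / w + 1).toNat, by omega⟩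
    by_cases hD : D_solution n w num
    · -- A returns n // w + 2 through the negative-index wraparound
      rw [if_pos hD]
      have hDm : n / w % 2 = 1 ∧ ¬ n % w = 0 := by
        have hD' := hD
        unfold D_solution at hD'
        rw [hfd, hmd, PySem.Int.mod_eq_emod_of_pos (by omega : (0:Int) < 2)] at hD'
        exact ⟨hD'.2.2.1, hD'.2.2.2⟩
      have hoffq : offI w (n / w) (w - 1) = 0 := by
        unfold offI; rw [if_neg (by omega)]; omega
      have hqw : 0 ≤ (n / w) * w := mul_nonneg hq0 (by omega)
      have hcz : ¬ pvGetCell (boxA (boxSt n w (n / w) (n % w) ((n / w + 1).toNat))) (-1) (-1) = 0 := by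
        rw [hcorner, hoffq, if_pos (by omega)]
        omega
      rw [hF, countUp, if_pos ⟨by omega, hcz⟩]
      have hcells : ∀ x : Int, (0:Int) ≤ x → x < n / w →
          ¬ pvGetCell (boxA (boxSt n w (n / w) (n % w) ((n / w + 1).toNat))) x (-1) = 0 := by
        intro x hx1 hx2
        rw [pvGetCell_boxSt_negcol n w (n / w) (n % w) _ hw x (by omega) (by omega),
            pvGetCell_boxSt n w (n / w) (n % w) _ x (w - 1) (by omega) (by omega)
              (by omega) (by omega)]
        have hxb := offI_bounds w x (w - 1) (by omega) (by omega)
        have hcap : capP n w (n / w) x (n % w) = n - x * w := by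
          unfold capP; rw [if_pos hx2]
        have hxw : x * w + w ≤ n := by nlinarith
        rw [hcap, if_pos (by omega)]
        have : 0 ≤ x * w := by positivity
        omega
      have htopz : ¬ pvGetCell (boxA (boxSt n w (n / w) (n % w) ((n / w + 1).toNat))) (n / w) (-1) = 0 := by
        rw [pvGetCell_boxSt_negcol n w (n / w) (n % w) _ hw (n / w) hq0 (by omega),
            pvGetCell_boxSt n w (n / w) (n % w) _ (n / w) (w - 1) hq0 (by omega)
              (by omega) (by omega), capP_self, hoffq, if_pos (by omega)]
        omega
      rw [show (-1 : Int) + 1 = 0 by omega, show (0 : Int) + 1 = 1 by omega,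
          countUp_run (n / w) (-1) _ hq0 (n / w).toNat F 0 1 (by omega) (by omega) hcells,
          if_neg htopz, hfd]
      omega
    · -- the corner cell is empty: A returns 0 = B
      rw [if_neg hD, haltz]
      have hDm : ¬ (n / w % 2 = 1 ∧ ¬ n % w = 0) := by
        intro hcon
        apply hD
        unfold D_solution
        rw [hfd, hmd, PySem.Int.mod_eq_emod_of_pos (by omega : (0:Int) < 2)]
        exact ⟨hn, hfound, hcon.1, hcon.2⟩
      have hcz : pvGetCell (boxA (boxSt n w (n / w) (n % w) ((n / w + 1).toNat))) (-1) (-1) = 0 := by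
        rw [hcorner]
        have : ¬ offI w (n / w) (w - 1) < n % w := by
          unfold offI; split_ifs <;> omega
        rw [if_neg this]
      rw [hF, countUp, if_neg (by rw [hcz]; simp)]

theorem solution_degenerate (n w num : Int) (hw : 1 ≤ w) (hc : n / w ≤ -2) :
    solution n w num = 0 := by
  have hfd : PySem.Int.floordiv n w = n / w := PySem.Int.floordiv_eq_ediv_of_pos (by omega)
  simp only [solution]
  rw [hfd, show (n / w + 1).toNat = 0 by omega, show (n / w + 2).toNat = 0 by omega,
      fillOuter, countUp]

theorem alt_degenerate (n w num : Int) (hn : n < 0) : solution_alt n w num = 0 := by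
  simp only [solution_alt]
  rw [if_pos (show num < 1 ∨ n < num by omega)]

-- ===== VERDICT (by name: the statement is the Claim_ definition above) =====
theorem solution_spec : Claim_unchanged_solution := by
  intro n w num _ hpre hnd
  have hw : 1 ≤ w := hpre.1
  rcases hpre.2 with hn | hneg
  · rw [solution_closed n w num hw hn, if_neg hnd]
  · rw [PySem.Int.floordiv_eq_ediv_of_pos (by omega : (0:Int) < w)] at hneg
    have hnneg : n < 0 := by
      by_contra h
      have := Int.ediv_nonneg (by omega : (0:Int) ≤ n) (by omega : (0:Int) ≤ w)
      omega
    rw [solution_degenerate n w num hw hneg, alt_degenerate n w num hnneg]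

theorem solution_changed : Claim_changed_solution := by
  unfold Claim_changed_solution; decide

theorem solution_tight : Claim_exact_solution := by
  intro n w num _ hpre hd
  have hd' := hd
  unfold D_solution at hd'
  have hw : 1 ≤ w := hpre.1
  have hn : 0 ≤ n := hd'.1
  rw [solution_closed n w num hw hn, if_pos hd]
  have hq0 : 0 ≤ n / w := Int.ediv_nonneg hn (by omega)
  have hfd : PySem.Int.floordiv n w = n / w := PySem.Int.floordiv_eq_ediv_of_pos (by omega)
  have hfound : ¬ (1 ≤ num ∧ num ≤ n) := hd'.2.1
  have haltz : solution_alt n w num = 0 := by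
    simp only [solution_alt]; rw [if_pos (show num < 1 ∨ n < num by omega)]
  rw [haltz, hfd]
  omega
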